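-- pv_equiv track=rewrite | github.com/Sp-bit-code/CARBON-CREDITS-DATA-MERGER-TOOL | carbonpre.py | detect_generation_col
-- ===== SOURCE A (Python) =====
-- def detect_generation_col(columns):
--     for c in columns:
--         cname = str(c).upper()
--         if "TODAY" in cname and "ACTUAL" in cname and "APRIL" not in cname and "TILL" not in cname:
--             return c
--     for c in columns:
--         cname = str(c).upper()
--         if "ACTUAL" in cname or ("DAILY" in cname and "GEN" in cname):
--             return c
--     return None
-- ===== SOURCE B (Python) =====
-- def detect_generation_col(columns):
--     def rank(cname):
--         if "TODAY" in cname and "ACTUAL" in cname and "APRIL" not in cname and "TILL" not in cname: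
--             return 0
--         if "ACTUAL" in cname or ("DAILY" in cname and "GEN" in cname):
--             return 1
--         return 2
--     candidates = [(rank(str(c).upper()), i, c) for i, c in enumerate(columns)]
--     candidates = [t for t in candidates if t[0] < 2]
--     if not candidates:
--         return None
--     return min(candidates)[2]
-- ===== Notes on version B (the rewrite author's own statement) =====
-- stated objective: alternative
-- what changed: Replaced A's two staged scans (strict pass, then loose pass) by scoring every column with a priority rank (0 strict, 1 loose, 2 neither), filtering out rank 2, and returning the minimum (rank, index, column) tuple, which realises the same strict-over-loose, earliest-index priority.
import Mathlib
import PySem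

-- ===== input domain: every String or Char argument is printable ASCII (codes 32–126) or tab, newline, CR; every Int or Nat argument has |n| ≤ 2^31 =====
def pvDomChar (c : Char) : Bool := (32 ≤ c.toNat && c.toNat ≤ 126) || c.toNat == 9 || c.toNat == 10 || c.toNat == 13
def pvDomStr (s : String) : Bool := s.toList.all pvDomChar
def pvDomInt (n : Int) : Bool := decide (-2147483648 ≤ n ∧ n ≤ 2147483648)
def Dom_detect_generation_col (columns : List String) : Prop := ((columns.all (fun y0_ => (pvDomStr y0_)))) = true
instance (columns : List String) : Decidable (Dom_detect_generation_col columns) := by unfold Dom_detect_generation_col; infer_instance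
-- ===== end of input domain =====

-- B replaces A's two staged scans by scoring each column with a priority rank and taking the minimum (rank, index, column) tuple (alternative decomposition; same result).


-- ===== PORT A =====
-- first for-loop of A: return the first strict ("TODAY"&"ACTUAL"&¬"APRIL"&¬"TILL") match
def pvPassStrict : List String → Option String
  | [] => none
  | c :: rest =>
    let cname := PySem.Str.upper c
    if PySem.Str.isIn "TODAY" cname && PySem.Str.isIn "ACTUAL" cname
        && !PySem.Str.isIn "APRIL" cname && !PySem.Str.isIn "TILL" cname then
      some c
    else pvPassStrict rest

-- second for-loop of A: return the first loose ("ACTUAL" or "DAILY"&"GEN") match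
def pvPassLoose : List String → Option String
  | [] => none
  | c :: rest =>
    let cname := PySem.Str.upper c
    if PySem.Str.isIn "ACTUAL" cname || (PySem.Str.isIn "DAILY" cname && PySem.Str.isIn "GEN" cname) then
      some c
    else pvPassLoose rest

def detect_generation_col (columns : List String) : Option String :=
  match pvPassStrict columns with
  | some c => some c
  | none => pvPassLoose columns

-- ===== PORT B =====
-- rank(cname): 0 = strict match, 1 = loose match, 2 = neither
def pvRank (cname : String) : Nat :=
  if PySem.Str.isIn "TODAY" cname && PySem.Str.isIn "ACTUAL" cname
      && !PySem.Str.isIn "APRIL" cname && !PySem.Str.isIn "TILL" cname then 0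
  else if PySem.Str.isIn "ACTUAL" cname || (PySem.Str.isIn "DAILY" cname && PySem.Str.isIn "GEN" cname) then 1
  else 2

-- Python's tuple '<' on (int, int, str): short-circuit lexicographic
def pvTupLt (a b : Nat × Int × String) : Bool :=
  decide (a.1 < b.1) || (decide (a.1 = b.1) &&
    (decide (a.2.1 < b.2.1) || (decide (a.2.1 = b.2.1) && decide (a.2.2 < b.2.2))))

-- the two comprehensions of Source B: score every enumerated column, keep rank < 2
def pvCandidates (columns : List String) : List (Nat × Int × String) :=
  ((PySem.List.enumerate columns).map (fun p => (pvRank (PySem.Str.upper p.2), p.1, p.2))).filter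
    (fun t => t.1 < 2)

-- min(candidates)[2] on a non-empty list (Python's min keeps the first minimal element)
def detect_generation_col_alt (columns : List String) : Option String :=
  match pvCandidates columns with
  | [] => none
  | x :: rest => some ((rest.foldl (fun b y => if pvTupLt y b then y else b) x).2.2)

-- ===== PRECONDITION & SPEC =====
def Spec_detect_generation_col (columns : List String) (out : Option String) : Prop := out = detect_generation_col_alt columns
instance (columns : List String) (out : Option String) : Decidable (Spec_detect_generation_col columns out) := by unfold Spec_detect_generation_col; infer_instance

-- ===== CLAIM (what is proved, stated in full; the proofs are below) =====
def Claim_equal_detect_generation_col : Prop := ∀ (columns : List String), Dom_detect_generation_col columns → Spec_detect_generation_col columns (detect_generation_col columns)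

-- ===== LEMMAS AND PROOFS =====
-- proof-only abbreviations for A's two conditions on a column c
def pvS (c : String) : Bool :=
  PySem.Str.isIn "TODAY" (PySem.Str.upper c) && PySem.Str.isIn "ACTUAL" (PySem.Str.upper c)
    && !PySem.Str.isIn "APRIL" (PySem.Str.upper c) && !PySem.Str.isIn "TILL" (PySem.Str.upper c)

def pvL (c : String) : Bool :=
  PySem.Str.isIn "ACTUAL" (PySem.Str.upper c)
    || (PySem.Str.isIn "DAILY" (PySem.Str.upper c) && PySem.Str.isIn "GEN" (PySem.Str.upper c))

theorem pvS_loose {c : String} (h : pvS c = true) : pvL c = true := by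
  simp only [pvS, pvL, Bool.and_eq_true, Bool.or_eq_true] at *
  exact Or.inl h.1.1.2

theorem pvRank_eq_zero_iff (c : String) : pvRank (PySem.Str.upper c) = 0 ↔ pvS c = true := by
  unfold pvRank pvS
  split_ifs with h1 h2 <;> simp_all

theorem pvRank_lt_two_iff (c : String) : pvRank (PySem.Str.upper c) < 2 ↔ pvL c = true := by
  unfold pvRank
  split_ifs with h1 h2
  · simpa using pvS_loose (by unfold pvS; exact h1)
  · simpa [pvL] using h2
  · simpa [pvL] using h2

-- proof-side recursive view of pvCandidates, at an arbitrary enumeration offset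
def pvCandAt (s : Int) (cs : List String) : List (Nat × Int × String) :=
  ((PySem.List.enumerate cs s).map (fun p => (pvRank (PySem.Str.upper p.2), p.1, p.2))).filter
    (fun t => t.1 < 2)

theorem pvCandidates_eq (columns : List String) : pvCandidates columns = pvCandAt 0 columns := rfl

theorem pvCandAt_nil (s : Int) : pvCandAt s [] = [] := rfl

theorem pvCandAt_cons (s : Int) (c : String) (cs : List String) :
    pvCandAt s (c :: cs) =
      if pvL c then (pvRank (PySem.Str.upper c), s, c) :: pvCandAt (s + 1) cs
      else pvCandAt (s + 1) cs := by
  simp only [pvCandAt, PySem.List.enumerate_cons, List.map_cons, List.filter_cons]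
  by_cases h : pvL c
  · have h2 : decide (pvRank (PySem.Str.upper c) < 2) = true :=
      decide_eq_true ((pvRank_lt_two_iff c).mpr h)
    rw [if_pos h2, if_pos h]
  · have h2 : ¬ decide (pvRank (PySem.Str.upper c) < 2) = true := by
      simp only [decide_eq_true_eq]
      exact fun hlt => h ((pvRank_lt_two_iff c).mp hlt)
    rw [if_neg h2, if_neg h]

-- first rank-0 candidate, if any
def pvFirst0 : List (Nat × Int × String) → Option (Nat × Int × String)
  | [] => none
  | x :: rest => if x.1 = 0 then some x else pvFirst0 rest

theorem pvPassLoose_eq (cs : List String) (s : Int) :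
    pvPassLoose cs = (pvCandAt s cs).head?.map (·.2.2) := by
  induction cs generalizing s with
  | nil => rfl
  | cons c rest ih =>
    rw [pvCandAt_cons]
    by_cases h : pvL c
    · simp only [if_pos h, List.head?_cons, Option.map_some]
      simp only [pvPassLoose]
      rw [if_pos (by simpa [pvL] using h)]
    · simp only [if_neg h]
      rw [← ih (s + 1)]
      simp only [pvPassLoose]
      rw [if_neg (by simpa [pvL] using h)]

theorem pvPassStrict_eq (cs : List String) (s : Int) :
    pvPassStrict cs = (pvFirst0 (pvCandAt s cs)).map (·.2.2) := by
  induction cs generalizing s with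
  | nil => rfl
  | cons c rest ih =>
    rw [pvCandAt_cons]
    by_cases hs : pvS c
    · have hl := pvS_loose hs
      simp only [if_pos hl, pvFirst0, (pvRank_eq_zero_iff c).mpr hs]
      simp only [pvPassStrict]
      rw [if_pos (by simpa [pvS] using hs)]
      rfl
    · have hstep : pvPassStrict (c :: rest) = pvPassStrict rest := by
        simp only [pvPassStrict]
        rw [if_neg (by simpa [pvS] using hs)]
      by_cases hl : pvL c
      · simp only [if_pos hl, pvFirst0]
        rw [if_neg (by simpa [pvRank_eq_zero_iff c] using hs)]
        rw [hstep, ih (s + 1)]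
      · simp only [if_neg hl]
        rw [hstep, ih (s + 1)]

theorem pvCandAt_rank_le {s : Int} {cs : List String} {x : Nat × Int × String}
    (hx : x ∈ pvCandAt s cs) : x.1 ≤ 1 := by
  have := List.of_mem_filter hx
  simpa using Nat.lt_succ_iff.mp (by simpa using this)

theorem pvCandAt_idx_ge {s : Int} {cs : List String} {x : Nat × Int × String}
    (hx : x ∈ pvCandAt s cs) : s ≤ x.2.1 := by
  induction cs generalizing s with
  | nil => simp [pvCandAt_nil] at hx
  | cons c rest ih =>
    rw [pvCandAt_cons] at hx
    by_cases h : pvL c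
    · rw [if_pos h] at hx
      rcases List.mem_cons.mp hx with h1 | h2
      · subst h1; simp
      · exact le_trans (by omega) (ih h2)
    · rw [if_neg h] at hx
      exact le_trans (by omega) (ih hx)

theorem pvCandAt_pairwise (s : Int) (cs : List String) :
    (pvCandAt s cs).Pairwise (fun a b => a.2.1 < b.2.1) := by
  induction cs generalizing s with
  | nil => simp [pvCandAt_nil]
  | cons c rest ih =>
    rw [pvCandAt_cons]
    by_cases h : pvL c
    · rw [if_pos h]
      refine List.pairwise_cons.mpr ⟨fun z hz => ?_, ih (s + 1)⟩
      have := pvCandAt_idx_ge hz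
      simp only at *
      omega
    · rw [if_neg h]; exact ih (s + 1)

-- the min-fold returns the first rank-0 element if any, else the (first) element it started from
theorem pvFoldMin (l : List (Nat × Int × String)) (best : Nat × Int × String)
    (hb : best.1 ≤ 1)
    (hidx : ∀ x ∈ l, x.1 ≤ 1 ∧ best.2.1 < x.2.1)
    (hp : l.Pairwise (fun a b => a.2.1 < b.2.1)) :
    l.foldl (fun b y => if pvTupLt y b then y else b) best =
      if best.1 = 0 then best else (pvFirst0 l).getD best := by
  induction l generalizing best with
  | nil => simp [pvFirst0]
  | cons y rest ih =>
    obtain ⟨hy1, hyidx⟩ := hidx y List.mem_cons_self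
    have hrest := List.pairwise_cons.mp hp
    have hidx' : ∀ x ∈ rest, x.1 ≤ 1 ∧ best.2.1 < x.2.1 :=
      fun x hx => hidx x (List.mem_cons_of_mem y hx)
    have hne : ¬ y.2.1 = best.2.1 := by omega
    have hnlt : ¬ y.2.1 < best.2.1 := by omega
    by_cases hb0 : best.1 = 0
    · have hlt : pvTupLt y best = false := by
        simp [pvTupLt, hne, hnlt]; omega
      rw [List.foldl_cons, hlt, if_neg Bool.false_ne_true]
      rw [ih best hb hidx' hrest.2]
      simp [hb0]
    · have hb1 : best.1 = 1 := by omega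
      by_cases hy0 : y.1 = 0
      · have hlt : pvTupLt y best = true := by
          simp [pvTupLt]; omega
        rw [List.foldl_cons, hlt, if_pos rfl]
        rw [ih y (by omega) (fun x hx => ⟨(hidx x (List.mem_cons_of_mem y hx)).1,
          hrest.1 x hx⟩) hrest.2]
        simp [pvFirst0, hy0, hb1]
      · have hlt : pvTupLt y best = false := by
          simp [pvTupLt, hne, hnlt]; omega
        rw [List.foldl_cons, hlt, if_neg Bool.false_ne_true]
        rw [ih best hb hidx' hrest.2]
        simp [pvFirst0, hy0, hb1]

-- ===== VERDICT (by name: the statement is the Claim_ definition above) =====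
theorem detect_generation_col_spec : Claim_equal_detect_generation_col := by
  intro columns _
  unfold Spec_detect_generation_col detect_generation_col detect_generation_col_alt
  rw [pvCandidates_eq, pvPassStrict_eq columns 0, pvPassLoose_eq columns 0]
  cases h : pvCandAt 0 columns with
  | nil => simp [pvFirst0]
  | cons x rest =>
    dsimp only
    have hpw := pvCandAt_pairwise 0 columns
    rw [h] at hpw
    have hpw' := List.pairwise_cons.mp hpw
    have hx1 : x.1 ≤ 1 := pvCandAt_rank_le (by rw [h]; exact List.mem_cons_self)
    rw [pvFoldMin rest x hx1
      (fun z hz => ⟨pvCandAt_rank_le (by rw [h]; exact List.mem_cons_of_mem x hz), hpw'.1 z hz⟩)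
      hpw'.2]
    by_cases hx0 : x.1 = 0
    · simp [pvFirst0, hx0]
    · simp only [pvFirst0, if_neg hx0]
      cases hf : pvFirst0 rest with
      | none => simp
      | some y => simp
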